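-- pv_equiv track=rewrite | github.com/iliyan-pigeon/Codewars_exercises | next_higher_bitwize.py | next_higher
-- ===== SOURCE A (Python) =====
-- def next_higher(n):
--     number_bits = bin(n).replace("b", "")
--     number_bits_zeros = len([i for i in number_bits if i == "0"])
--     number_bits_ones = len([i for i in number_bits if i == "1"])
--
--     next_number = n
--     while True:
--         next_number += 1
--         next_bits = bin(next_number)[2:].replace("b", "")
--         next_bits_zeros = len([i for i in next_bits if i == "0"])
--         next_bits_ones = len([i for i in next_bits if i == "1"])
--
--         if number_bits_zeros == next_bits_zeros and number_bits_ones == next_bits_ones: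
--             return next_number
-- ===== SOURCE B (Python) =====
-- def next_higher(n):
--     m = abs(n)
--     L = m.bit_length()
--     p = m.bit_count()
--     return (1 << L) + ((1 << (p - 1)) - 1)
-- ===== Notes on version B (the rewrite author's own statement) =====
-- stated objective: faster
-- what changed: A linearly scans every integer above n, re-rendering each as a binary string and counting digit characters until the zero/one counts match; B builds the answer directly with shifts from abs(n) bit_length L and popcount p: the bit at position L set plus the lowest p-1 bits set, with no loop and no strings.
-- outside the precondition, e.g. on next_higher(0): A does not finish within the time limit, B raises ValueError
import Mathlib
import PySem

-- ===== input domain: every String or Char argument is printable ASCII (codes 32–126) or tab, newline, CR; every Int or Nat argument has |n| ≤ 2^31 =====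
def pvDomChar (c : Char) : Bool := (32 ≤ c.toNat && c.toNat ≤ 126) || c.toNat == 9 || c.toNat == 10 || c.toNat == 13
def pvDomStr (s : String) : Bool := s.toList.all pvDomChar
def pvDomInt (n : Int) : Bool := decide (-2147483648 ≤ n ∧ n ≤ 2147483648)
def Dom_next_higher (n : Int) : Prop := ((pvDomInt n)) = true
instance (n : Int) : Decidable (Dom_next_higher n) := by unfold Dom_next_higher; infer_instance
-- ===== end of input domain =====

-- B replaces A's linear scan over integers (re-rendering each as a binary string) by a
-- closed-form bit construction from abs(n)'s bit_length and popcount: objective = faster.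

-- ===== PORT A =====
-- A's unbounded 'while True' search, with the loop body extracted as a fueled helper.
-- The fuel 2^35 exceeds the number of iterations A performs for every n in Dom with n ≠ 0
-- (proved below); the fuel-exhausted branch is unreachable there.
def next_higher_loop (number_bits_zeros number_bits_ones : Nat) : Nat → Int → Int
  | 0, next_number => next_number
  | fuel+1, next_number =>
    let next_number := next_number + 1
    let next_bits := PySem.Str.replace (PySem.Str.slice (PySem.Int.pyBin next_number) (some 2) none) "b" ""
    let next_bits_zeros := (next_bits.toList.filter (fun i => i == '0')).length
    let next_bits_ones := (next_bits.toList.filter (fun i => i == '1')).length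
    if number_bits_zeros = next_bits_zeros ∧ number_bits_ones = next_bits_ones then next_number
    else next_higher_loop number_bits_zeros number_bits_ones fuel next_number

def next_higher (n : Int) : Int :=
  let number_bits := PySem.Str.replace (PySem.Int.pyBin n) "b" ""
  let number_bits_zeros := (number_bits.toList.filter (fun i => i == '0')).length
  let number_bits_ones := (number_bits.toList.filter (fun i => i == '1')).length
  next_higher_loop number_bits_zeros number_bits_ones 34359738368 n

-- ===== PORT B =====
-- Python's << is Nat's <<<; Nat's truncated subtraction in (p - 1) differs from Python only at
-- p = 0, i.e. n = 0, where Python B raises ValueError — excluded by Pre_.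
def next_higher_alt (n : Int) : Int :=
  let m := |n|
  let L := PySem.Int.bitLength m
  let p := PySem.Int.bitCount m
  (((1 <<< L) + ((1 <<< (p - 1)) - 1) : Nat) : Int)

-- ===== PRECONDITION & SPEC =====
-- Pre_ excludes only n = 0: there A never returns (its loop searches for a binary string with
-- two '0's and no '1's, which no candidate has) and Python B raises ValueError (negative shift count).
def Pre_next_higher (n : Int) : Prop := n ≠ 0
instance (n : Int) : Decidable (Pre_next_higher n) := by unfold Pre_next_higher; infer_instance

def pvWitness_next_higher : Int := 5

def Spec_next_higher (n : Int) (out : Int) : Prop := out = next_higher_alt n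
instance (n : Int) (out : Int) : Decidable (Spec_next_higher n out) := by unfold Spec_next_higher; infer_instance

-- ===== CLAIM (what is proved, stated in full; the proofs are below) =====
def Claim_equal_next_higher : Prop := ∀ (n : Int), Dom_next_higher n → Pre_next_higher n → Spec_next_higher n (next_higher n)

-- ===== LEMMAS AND PROOFS =====

-- binary digit list of v, most significant first (what bin(v) shows after "0b")
def pvBits (v : Nat) : List Char :=
  if _h : v ≤ 1 then [Nat.digitChar v]
  else pvBits (v / 2) ++ [Nat.digitChar (v % 2)]
decreasing_by exact Nat.div_lt_self (by omega) (by omega)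

theorem pv_go_filter : ∀ (fuel : Nat) (l acc : List Char), l.length ≤ fuel →
    PySem.Chars.replace.go ['b'] [] fuel l acc = acc.reverse ++ l.filter (fun c => c != 'b') := by
  intro fuel
  induction fuel with
  | zero => intro l acc h; cases l with
    | nil => simp [PySem.Chars.replace.go]
    | cons c t => simp at h
  | succ f ih =>
    intro l acc h
    cases l with
    | nil => simp [PySem.Chars.replace.go]
    | cons c t =>
      simp only [PySem.Chars.replace.go]
      by_cases hc : c = 'b'
      · subst hc
        rw [if_pos (by simp [List.isPrefixOf])]
        simp only [List.length_cons, List.length_nil, List.drop_succ_cons, List.drop_zero, List.reverse_nil,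
          List.nil_append]
        rw [ih t acc (by simpa using h)]
        simp
      · rw [if_neg (by simp [List.isPrefixOf]; exact fun hh => hc hh.symm)]
        rw [ih t (c :: acc) (by simpa using h)]
        simp [hc]

theorem pv_replace_b (cs : List Char) :
    PySem.Chars.replace cs ['b'] [] = cs.filter (fun c => c != 'b') := by
  rw [PySem.Chars.replace]
  simp only [List.isEmpty_cons, if_false, Bool.false_eq_true]
  rw [pv_go_filter cs.length cs [] le_rfl]
  simp

theorem pv_toDigitsCore_eq : ∀ (fuel v : Nat) (ds : List Char), v < 2 ^ (fuel + 1) →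
    Nat.toDigitsCore 2 (fuel + 1) v ds = pvBits v ++ ds := by
  intro fuel
  induction fuel with
  | zero =>
    intro v ds h
    have hv : v ≤ 1 := by simpa using Nat.lt_succ_iff.mp (by simpa using h)
    have hv2 : v / 2 = 0 := by omega
    rw [Nat.toDigitsCore, pvBits]
    simp only [hv2, dif_pos hv]
    have : v % 2 = v := by omega
    rw [this]
    rfl
  | succ f ih =>
    intro v ds h
    by_cases hv : v ≤ 1
    · have hv2 : v / 2 = 0 := by omega
      rw [Nat.toDigitsCore, pvBits]
      simp only [hv2, dif_pos hv]
      have : v % 2 = v := by omega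
      rw [this]
      rfl
    · have hv2 : v / 2 ≠ 0 := by omega
      rw [Nat.toDigitsCore]
      simp only [hv2]
      rw [ih (v / 2) _ (by rw [pow_succ] at h; omega)]
      conv_rhs => rw [pvBits]
      simp [hv]

theorem pv_toDigits_two (v : Nat) : Nat.toDigits 2 v = pvBits v := by
  have h : v < 2 ^ (v + 1) := lt_of_lt_of_le Nat.lt_two_pow_self (Nat.pow_le_pow_right (by omega) (by omega))
  cases v with
  | zero => rw [Nat.toDigits, pv_toDigitsCore_eq 0 0 [] (by omega)]; simp
  | succ w =>
    rw [Nat.toDigits, pv_toDigitsCore_eq w.succ (w+1) [] (by simpa using h)]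
    simp

theorem pv_mem_pvBits (v : Nat) : ∀ c ∈ pvBits v, c = '0' ∨ c = '1' := by
  induction v using Nat.strong_induction_on with
  | _ v ih =>
    rw [pvBits]
    by_cases hv : v ≤ 1
    · simp only [dif_pos hv]
      interval_cases v <;> simp [Nat.digitChar]
    · simp only [dif_neg hv, List.mem_append, List.mem_singleton]
      intro c hc
      rcases hc with hc | hc
      · exact ih (v / 2) (Nat.div_lt_self (by omega) (by omega)) c hc
      · rcases Nat.mod_two_eq_zero_or_one v with h2 | h2 <;> simp [hc, h2, Nat.digitChar]

theorem pv_countP_cons_false {p : Char → Bool} {c : Char} (h : p c = false) (l : List Char) :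
    List.countP p (c :: l) = List.countP p l := by simp [h]

theorem pv_countP_cons_true {p : Char → Bool} {c : Char} (h : p c = true) (l : List Char) :
    List.countP p (c :: l) = List.countP p l + 1 := by simp [h]

theorem pv_count1_pvBits (v : Nat) :
    List.countP (fun i => i == '1') (pvBits v) = PySem.Int.bitCount (v : Int) := by
  induction v using Nat.strong_induction_on with
  | _ v ih =>
    rw [pvBits]
    by_cases hv : v ≤ 1
    · simp only [dif_pos hv]
      interval_cases v <;> decide
    · simp only [dif_neg hv]
      rw [List.countP_append, ih (v / 2) (Nat.div_lt_self (by omega) (by omega))]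
      rw [PySem.Int.bitCount_natCast (by omega : 0 < v)]
      rcases Nat.mod_two_eq_zero_or_one v with h2 | h2 <;> rw [h2]
      · rw [pv_countP_cons_false (by rfl) [], List.countP_nil]
        omega
      · rw [pv_countP_cons_true (by rfl) [], List.countP_nil]
        omega

theorem pv_count0_pvBits (v : Nat) (hv : 0 < v) :
    List.countP (fun i => i == '0') (pvBits v) =
      PySem.Int.bitLength (v : Int) - PySem.Int.bitCount (v : Int) := by
  induction v using Nat.strong_induction_on with
  | _ v ih =>
    rw [pvBits]
    by_cases hv1 : v ≤ 1
    · simp only [dif_pos hv1]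
      interval_cases v
      decide
    · simp only [dif_neg hv1]
      rw [List.countP_append, ih (v / 2) (Nat.div_lt_self (by omega) (by omega)) (by omega)]
      rw [PySem.Int.bitLength_natCast (by omega : 0 < v), PySem.Int.bitCount_natCast (by omega : 0 < v)]
      have hle := PySem.Int.bitCount_le_bitLength ((v / 2 : Nat) : Int)
      rcases Nat.mod_two_eq_zero_or_one v with h2 | h2 <;> rw [h2]
      · rw [pv_countP_cons_true (by rfl) [], List.countP_nil]
        omega
      · rw [pv_countP_cons_false (by rfl) [], List.countP_nil]
        omega

-- what bin(m)[2:].replace("b","") contains, for every m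
theorem pv_nextBits_eq (m : Int) :
    (PySem.Str.replace (PySem.Str.slice (PySem.Int.pyBin m) (some 2) none) "b" "").toList
      = pvBits m.natAbs := by
  rw [PySem.Str.toList_replace]
  have hb : ("b" : String).toList = ['b'] := rfl
  have he : ("" : String).toList = [] := rfl
  rw [hb, he, pv_replace_b]
  rw [PySem.Str.toList_slice, PySem.Chars.slice_eq_listSlice, PySem.Int.toList_pyBin]
  rw [PySem.List.slice_from (PySem.Int.toBinChars0b m) (a := 2) (by omega)]
  have hnob : ∀ c ∈ pvBits m.natAbs, (c != 'b') = true := by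
    intro c hc
    rcases pv_mem_pvBits m.natAbs c hc with h | h <;> simp [h]
  rw [PySem.Int.toBinChars0b]
  by_cases hm : m < 0
  · rw [if_pos hm, pv_toDigits_two]
    show List.filter _ (List.drop 2 ('-' :: '0' :: 'b' :: pvBits m.natAbs)) = _
    simp only [List.drop_succ_cons, List.drop_zero]
    rw [List.filter_cons]
    simp only [show (('b' != 'b') = false) from rfl, Bool.false_eq_true, if_false]
    exact List.filter_eq_self.mpr hnob
  · rw [if_neg hm]
    have : m.toNat = m.natAbs := by omega
    rw [this, pv_toDigits_two]
    show List.filter _ (List.drop 2 ('0' :: 'b' :: pvBits m.natAbs)) = _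
    simp only [List.drop_succ_cons, List.drop_zero]
    exact List.filter_eq_self.mpr hnob

-- the loop body, rewritten through pv_nextBits_eq
theorem pv_loop_succ (Z O fuel : Nat) (cur : Int) :
    next_higher_loop Z O (fuel+1) cur =
      if Z = List.countP (fun i => i == '0') (pvBits (cur+1).natAbs) ∧
         O = List.countP (fun i => i == '1') (pvBits (cur+1).natAbs)
      then cur + 1 else next_higher_loop Z O fuel (cur + 1) := by
  simp only [next_higher_loop, pv_nextBits_eq, ← List.countP_eq_length_filter]

theorem pv_loop_reaches (Z O : Nat) (low t : Int)
    (ht : Z = List.countP (fun i => i == '0') (pvBits t.natAbs) ∧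
          O = List.countP (fun i => i == '1') (pvBits t.natAbs))
    (hfail : ∀ m : Int, low < m → m < t →
        ¬ (Z = List.countP (fun i => i == '0') (pvBits m.natAbs) ∧
           O = List.countP (fun i => i == '1') (pvBits m.natAbs))) :
    ∀ (fuel : Nat) (cur : Int), low ≤ cur → cur < t → (t - cur).toNat ≤ fuel →
      next_higher_loop Z O fuel cur = t := by
  intro fuel
  induction fuel with
  | zero => intro cur h0 h1 h2; omega
  | succ f ih =>
    intro cur h0 h1 h2
    rw [pv_loop_succ]
    by_cases he : cur + 1 = t
    · rw [he, if_pos ht]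
    · rw [if_neg (hfail (cur + 1) (by omega) (by omega))]
      exact ih (cur + 1) (by omega) (by omega) (by omega)

-- bit-arithmetic facts about PySem.Int.bitLength / bitCount on Nat casts
theorem pv_bitLength_eq (v k : Nat) (h1 : 2 ^ k ≤ v) (h2 : v < 2 ^ (k + 1)) :
    PySem.Int.bitLength (v : Int) = k + 1 := by
  have hv : (v : Int) ≠ 0 := by
    have : 0 < 2 ^ k := pow_pos (by omega : (0:Nat) < 2) k
    exact_mod_cast (by omega : v ≠ 0)
  have hlt := PySem.Int.lt_two_pow_bitLength (v : Int)
  have hle := PySem.Int.two_pow_bitLength_le (v : Int) hv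
  rw [Int.natAbs_natCast] at hlt hle
  set B := PySem.Int.bitLength (v : Int) with hB
  have hkB : k < B := by
    have : 2 ^ k < 2 ^ B := lt_of_le_of_lt h1 hlt
    exact (Nat.pow_lt_pow_iff_right (by omega)).mp this
  have hBk : B - 1 < k + 1 := by
    have : 2 ^ (B - 1) < 2 ^ (k + 1) := lt_of_le_of_lt hle h2
    exact (Nat.pow_lt_pow_iff_right (by omega)).mp this
  omega

theorem pv_bitCount_pow_add : ∀ (k r : Nat), r < 2 ^ k →
    PySem.Int.bitCount ((2 ^ k + r : Nat) : Int) = 1 + PySem.Int.bitCount (r : Int) := by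
  intro k
  induction k with
  | zero =>
    intro r h
    have : r = 0 := by omega
    subst this; decide
  | succ j ih =>
    intro r h
    rw [PySem.Int.bitCount_natCast (by positivity : 0 < 2 ^ (j+1) + r)]
    have hdiv : (2 ^ (j + 1) + r) / 2 = 2 ^ j + r / 2 := by
      rw [pow_succ]
      omega
    have hmod : (2 ^ (j + 1) + r) % 2 = r % 2 := by
      rw [pow_succ]
      omega
    rw [hdiv, hmod, ih (r / 2) (by rw [pow_succ] at h; omega)]
    by_cases hr : r = 0
    · subst hr; simp
    · rw [PySem.Int.bitCount_natCast (by omega : 0 < r)]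
      omega

theorem pv_bitCount_pow_sub_one : ∀ (k : Nat), PySem.Int.bitCount ((2 ^ k - 1 : Nat) : Int) = k := by
  intro k
  induction k with
  | zero => decide
  | succ j ih =>
    have hpos : 0 < 2 ^ (j + 1) - 1 := by
      have : 2 ≤ 2 ^ (j + 1) := Nat.le_self_pow (by omega) 2
      omega
    rw [PySem.Int.bitCount_natCast hpos]
    have h2 : 2 ≤ 2 ^ (j + 1) := Nat.le_self_pow (by omega) 2
    have hdiv : (2 ^ (j + 1) - 1) / 2 = 2 ^ j - 1 := by
      rw [pow_succ]; omega
    have hmod : (2 ^ (j + 1) - 1) % 2 = 1 := by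
      rw [pow_succ]; omega
    rw [hdiv, hmod, ih]
    omega

theorem pv_le_of_bitCount (v : Nat) : 2 ^ PySem.Int.bitCount (v : Int) - 1 ≤ v := by
  induction v using Nat.strong_induction_on with
  | _ v ih =>
    by_cases hv : v = 0
    · subst hv; decide
    · rw [PySem.Int.bitCount_natCast (by omega : 0 < v)]
      have := ih (v / 2) (Nat.div_lt_self (by omega) (by omega))
      rcases Nat.mod_two_eq_zero_or_one v with h2 | h2 <;> rw [h2]
      · simp only [Nat.zero_add]
        have : 2 * (2 ^ PySem.Int.bitCount ((v / 2 : Nat) : Int) - 1) ≤ 2 * (v / 2) :=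
          Nat.mul_le_mul_left 2 this
        have hp : 0 < 2 ^ PySem.Int.bitCount ((v / 2 : Nat) : Int) := pow_pos (by omega : (0:Nat) < 2) _
        omega
      · have hpow : (2:Nat) ^ (1 + PySem.Int.bitCount ((v / 2 : Nat) : Int))
            = 2 * 2 ^ PySem.Int.bitCount ((v / 2 : Nat) : Int) := by
          rw [pow_add]; ring
        have : 2 * (2 ^ PySem.Int.bitCount ((v / 2 : Nat) : Int) - 1) ≤ 2 * (v / 2) :=
          Nat.mul_le_mul_left 2 this
        have hp : 0 < 2 ^ PySem.Int.bitCount ((v / 2 : Nat) : Int) := pow_pos (by omega : (0:Nat) < 2) _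
        omega

theorem pv_one_le_bitCount (v : Nat) (hv : 0 < v) : 1 ≤ PySem.Int.bitCount (v : Int) := by
  induction v using Nat.strong_induction_on with
  | _ v ih =>
    rw [PySem.Int.bitCount_natCast hv]
    rcases Nat.mod_two_eq_zero_or_one v with h2 | h2
    · have := ih (v / 2) (Nat.div_lt_self (by omega) (by omega)) (by omega)
      omega
    · omega

-- counts of bin(n).replace("b",""): one extra '0' in front of the digits of |n|
theorem pv_numberBits_counts (n : Int) (hn : n ≠ 0) :
    ((PySem.Str.replace (PySem.Int.pyBin n) "b" "").toList.filter (fun i => i == '0')).length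
        = (PySem.Int.bitLength ((n.natAbs : Nat) : Int) - PySem.Int.bitCount ((n.natAbs : Nat) : Int)) + 1 ∧
    ((PySem.Str.replace (PySem.Int.pyBin n) "b" "").toList.filter (fun i => i == '1')).length
        = PySem.Int.bitCount ((n.natAbs : Nat) : Int) := by
  rw [PySem.Str.toList_replace]
  have hb : ("b" : String).toList = ['b'] := rfl
  have he : ("" : String).toList = [] := rfl
  rw [hb, he, pv_replace_b, PySem.Int.toList_pyBin, PySem.Int.toBinChars0b]
  have hnob : ∀ c ∈ pvBits n.natAbs, (c != 'b') = true := by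
    intro c hc
    rcases pv_mem_pvBits n.natAbs c hc with h | h <;> simp [h]
  have hfilter : List.filter (fun c => c != 'b') (pvBits n.natAbs) = pvBits n.natAbs :=
    List.filter_eq_self.mpr hnob
  have hpos : 0 < n.natAbs := by omega
  have h0 := pv_count0_pvBits n.natAbs hpos
  have h1 := pv_count1_pvBits n.natAbs
  rw [← List.countP_eq_length_filter, ← List.countP_eq_length_filter]
  by_cases hm : n < 0
  · rw [if_pos hm, pv_toDigits_two]
    have e1 : List.filter (fun c => c != 'b') ('-' :: '0' :: 'b' :: pvBits n.natAbs)
        = '-' :: '0' :: pvBits n.natAbs := by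
      rw [List.filter_cons, List.filter_cons, List.filter_cons]
      simp only [show (('-' != 'b') = true) from rfl, show (('0' != 'b') = true) from rfl,
        show (('b' != 'b') = false) from rfl, Bool.false_eq_true, if_true, if_false, hfilter]
    rw [e1]
    rw [pv_countP_cons_false (p := fun i => i == '0') (c := '-') rfl,
        pv_countP_cons_true (p := fun i => i == '0') (c := '0') rfl,
        pv_countP_cons_false (p := fun i => i == '1') (c := '-') rfl,
        pv_countP_cons_false (p := fun i => i == '1') (c := '0') rfl]
    constructor <;> omega
  · rw [if_neg hm]
    have : n.toNat = n.natAbs := by omega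
    rw [this, pv_toDigits_two]
    have e1 : List.filter (fun c => c != 'b') ('0' :: 'b' :: pvBits n.natAbs)
        = '0' :: pvBits n.natAbs := by
      rw [List.filter_cons, List.filter_cons]
      simp only [show (('0' != 'b') = true) from rfl,
        show (('b' != 'b') = false) from rfl, Bool.false_eq_true, if_true, if_false, hfilter]
    rw [e1]
    rw [pv_countP_cons_true (p := fun i => i == '0') (c := '0') rfl,
        pv_countP_cons_false (p := fun i => i == '1') (c := '0') rfl]
    constructor <;> omega

-- ===== VERDICT (by name: the statement is the Claim_ definition above) =====
theorem next_higher_spec : Claim_equal_next_higher := by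
  intro n hdom hpre
  unfold Spec_next_higher
  have hdb : -2147483648 ≤ n ∧ n ≤ 2147483648 := by
    simpa [Dom_next_higher, pvDomInt] using hdom
  have hn0 : n ≠ 0 := hpre
  set a : Nat := n.natAbs with hadef
  have ha : 0 < a := by rw [hadef]; omega
  set L : Nat := PySem.Int.bitLength (a : Int) with hLdef
  set p : Nat := PySem.Int.bitCount (a : Int) with hpdef
  have hp1 : 1 ≤ p := pv_one_le_bitCount a ha
  have hpL : p ≤ L := PySem.Int.bitCount_le_bitLength ((a : Nat) : Int)
  have hL1 : 2 ^ (L - 1) ≤ a := by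
    have := PySem.Int.two_pow_bitLength_le ((a : Nat) : Int) (by exact_mod_cast (by omega : a ≠ 0))
    rwa [Int.natAbs_natCast] at this
  have hL2 : a < 2 ^ L := by
    have := PySem.Int.lt_two_pow_bitLength ((a : Nat) : Int)
    rwa [Int.natAbs_natCast] at this
  have hr : 2 ^ (p - 1) - 1 < 2 ^ L := by
    have h1 : (2:Nat) ^ (p - 1) ≤ 2 ^ (L - 1) := Nat.pow_le_pow_right (by omega) (by omega)
    have h2 : (2:Nat) ^ (L - 1) < 2 ^ L := Nat.pow_lt_pow_right (by omega) (by omega)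
    omega
  set tN : Nat := 2 ^ L + (2 ^ (p - 1) - 1) with htNdef
  -- B's value is tN
  have hB : next_higher_alt n = ((tN : Nat) : Int) := by
    show ((((1 <<< PySem.Int.bitLength |n|) + ((1 <<< (PySem.Int.bitCount |n| - 1)) - 1)) : Nat) : Int) = _
    have habs : |n| = ((a : Nat) : Int) := by rw [hadef]; exact Int.abs_eq_natAbs n
    rw [habs, ← hLdef, ← hpdef, htNdef]
    simp [Nat.shiftLeft_eq]
  -- A's search condition holds at tN
  have hbLt : PySem.Int.bitLength ((tN : Nat) : Int) = L + 1 := by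
    refine pv_bitLength_eq tN L (by omega) ?_
    have : (2:Nat) ^ (L + 1) = 2 ^ L * 2 := pow_succ 2 L
    omega
  have hbCt : PySem.Int.bitCount ((tN : Nat) : Int) = p := by
    rw [htNdef, pv_bitCount_pow_add L (2 ^ (p - 1) - 1) hr, pv_bitCount_pow_sub_one (p - 1)]
    omega
  have ht0 : List.countP (fun i => i == '0') (pvBits tN) = (L - p) + 1 := by
    rw [pv_count0_pvBits tN (by have : 0 < (2:Nat) ^ L := pow_pos (by omega) L; omega),
      hbLt, hbCt]
    omega
  have ht1 : List.countP (fun i => i == '1') (pvBits tN) = p := by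
    rw [pv_count1_pvBits tN, hbCt]
  -- no integer below tN satisfies the condition
  have hfail : ∀ m : Int, n < m → m < ((tN : Nat) : Int) →
      ¬ ((L - p) + 1 = List.countP (fun i => i == '0') (pvBits m.natAbs) ∧
         p = List.countP (fun i => i == '1') (pvBits m.natAbs)) := by
    rintro m hnm hm ⟨h0', h1'⟩
    by_cases hm0 : m.natAbs = 0
    · rw [hm0] at h1'
      have hb0 : pvBits 0 = ['0'] := by rw [pvBits]; rfl
      rw [hb0] at h1'
      have : List.countP (fun i => i == '1') ['0'] = 0 := rfl
      omega
    · set b : Nat := m.natAbs with hbdef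
      rw [pv_count0_pvBits b (by omega)] at h0'
      rw [pv_count1_pvBits b] at h1'
      have hble := PySem.Int.bitCount_le_bitLength ((b : Nat) : Int)
      have hbL : PySem.Int.bitLength ((b : Nat) : Int) = L + 1 := by omega
      have hge : 2 ^ L ≤ b := by
        have := PySem.Int.two_pow_bitLength_le ((b : Nat) : Int)
          (by exact_mod_cast (by omega : b ≠ 0))
        rw [Int.natAbs_natCast, hbL] at this
        simpa using this
      have hlt : b < 2 ^ (L + 1) := by
        have := PySem.Int.lt_two_pow_bitLength ((b : Nat) : Int)
        rwa [Int.natAbs_natCast, hbL] at this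
      by_cases hmneg : m < 0
      · -- n < m < 0, so |m| < |n| < 2^L, contradicting 2^L ≤ |m|
        have hba : b < a := by rw [hbdef, hadef]; omega
        omega
      · -- 0 < m below tN but with tN's signature: minimality is violated
        have hbtN : b < tN := by omega
        set r : Nat := b - 2 ^ L with hrdef
        have hr2 : r < 2 ^ L := by
          have : (2:Nat) ^ (L + 1) = 2 ^ L * 2 := pow_succ 2 L
          omega
        have hbr : b = 2 ^ L + r := by omega
        have hbc : PySem.Int.bitCount ((b : Nat) : Int) = 1 + PySem.Int.bitCount ((r : Nat) : Int) := by
          rw [hbr]; exact pv_bitCount_pow_add L r hr2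
        have hbcr : PySem.Int.bitCount ((r : Nat) : Int) = p - 1 := by omega
        have := pv_le_of_bitCount r
        rw [hbcr] at this
        omega
  -- run A's loop
  obtain ⟨hZ, hO⟩ := pv_numberBits_counts n hpre
  have hA : next_higher n = next_higher_loop
      ((PySem.Str.replace (PySem.Int.pyBin n) "b" "").toList.filter (fun i => i == '0')).length
      ((PySem.Str.replace (PySem.Int.pyBin n) "b" "").toList.filter (fun i => i == '1')).length
      34359738368 n := rfl
  rw [hA, hZ, hO, hB]
  have hL32 : L ≤ 32 := by
    by_contra hgt
    have h1 : (2:Nat) ^ 32 ≤ 2 ^ (L - 1) := Nat.pow_le_pow_right (by omega) (by omega)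
    have h2 : (2:Nat) ^ 32 = 4294967296 := by norm_num
    omega
  have htb : tN ≤ 2 ^ 32 + 2 ^ 31 := by
    have h1 : (2:Nat) ^ L ≤ 2 ^ 32 := Nat.pow_le_pow_right (by omega) (by omega)
    have h2 : (2:Nat) ^ (p - 1) ≤ 2 ^ 31 := Nat.pow_le_pow_right (by omega) (by omega)
    omega
  have hnlt : n < ((tN : Nat) : Int) := by
    have h1 : n ≤ ((a : Nat) : Int) := by rw [hadef]; exact Int.le_natAbs
    have h2 : ((a : Nat) : Int) < ((tN : Nat) : Int) := by exact_mod_cast (by omega : a < tN)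
    omega
  refine pv_loop_reaches _ _ n ((tN : Nat) : Int) ?_ hfail 34359738368 n le_rfl hnlt ?_
  · rw [Int.natAbs_natCast, ht0, ht1]
    exact ⟨rfl, rfl⟩
  · have h2 : (2:Nat) ^ 32 = 4294967296 := by norm_num
    have h3 : (2:Nat) ^ 31 = 2147483648 := by norm_num
    omega
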